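-- pv_equiv track=rewrite | github.com/juani-castore/recursionPractica | guia_recursividad.py | contar_coincidencias
-- ===== SOURCE A (Python) =====
-- from typing import List
--
-- def contar_coincidencias(xs: List[int]) -> int:
--     if len(xs) == 0:
--         return 0
--     else:
--         nro_actual = xs.pop()
--         if nro_actual == len(xs):
--             return contar_coincidencias(xs) + 1
--         else:
--             return contar_coincidencias(xs)
-- ===== SOURCE B (Python) =====
-- from typing import List
--
-- def contar_coincidencias(xs: List[int]) -> int:
--     count = 0
--     while xs:
--         x = xs.pop()
--         if x == len(xs):
--             count += 1
--     return count
-- ===== Notes on version B (the rewrite author's own statement) =====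
-- stated objective: simpler
-- what changed: Replaces the non-tail recursion with an iterative while/pop loop and a counter accumulator, keeping the same pop-from-the-end mutation of xs.
import Mathlib
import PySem

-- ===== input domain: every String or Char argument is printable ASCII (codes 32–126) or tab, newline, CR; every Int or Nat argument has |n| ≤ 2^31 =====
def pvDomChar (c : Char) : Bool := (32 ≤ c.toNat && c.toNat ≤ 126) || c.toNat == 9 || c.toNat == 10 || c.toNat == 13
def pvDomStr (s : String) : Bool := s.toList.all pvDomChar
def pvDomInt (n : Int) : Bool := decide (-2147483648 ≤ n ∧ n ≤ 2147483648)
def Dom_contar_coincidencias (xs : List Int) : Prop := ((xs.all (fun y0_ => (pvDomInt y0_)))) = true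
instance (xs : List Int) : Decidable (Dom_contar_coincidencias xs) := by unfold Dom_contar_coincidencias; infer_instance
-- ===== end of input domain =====

-- B replaces A's recursion by an iterative pop loop with a counter; equivalence proved for the
-- RETURN value (both Pythons empty the argument list in place the same way).

-- ===== PORT A =====
-- A: recursion popping the last element; xs.pop() = getLast, remainder = dropLast.
def contar_coincidencias (xs : List Int) : Int :=
  if h : xs = [] then 0
  else
    let nro_actual := xs.getLast h
    let rest := xs.dropLast
    if nro_actual = (rest.length : Int) then contar_coincidencias rest + 1
    else contar_coincidencias rest
termination_by xs.length
decreasing_by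
  all_goals
    have := List.length_pos_of_ne_nil h
    rw [List.length_dropLast]
    omega

-- ===== PORT B =====
-- B's while-pop loop: popping from the end = walking xs.reverse, with the counter as accumulator;
-- after a pop the remaining length is the tail's length.
def pvAltLoop : List Int → Int → Int
  | [], count => count
  | x :: rest, count =>
      pvAltLoop rest (if x = (rest.length : Int) then count + 1 else count)

def contar_coincidencias_alt (xs : List Int) : Int :=
  pvAltLoop xs.reverse 0

-- ===== PRECONDITION & SPEC =====
def Spec_contar_coincidencias (xs : List Int) (out : Int) : Prop := out = contar_coincidencias_alt xs
instance (xs : List Int) (out : Int) : Decidable (Spec_contar_coincidencias xs out) := by unfold Spec_contar_coincidencias; infer_instance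

-- ===== CLAIM (what is proved, stated in full; the proofs are below) =====
def Claim_equal_contar_coincidencias : Prop := ∀ (xs : List Int), Dom_contar_coincidencias xs → Spec_contar_coincidencias xs (contar_coincidencias xs)

-- ===== LEMMAS AND PROOFS =====

theorem pvAltLoop_add (l : List Int) (c : Int) : pvAltLoop l (c + 1) = pvAltLoop l c + 1 := by
  induction l generalizing c with
  | nil => rfl
  | cons x rest ih =>
      simp only [pvAltLoop]
      split_ifs <;> rw [ih]

theorem contar_eq_alt (xs : List Int) : contar_coincidencias xs = contar_coincidencias_alt xs := by
  induction xs using List.reverseRecOn with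
  | nil => simp [contar_coincidencias, contar_coincidencias_alt, pvAltLoop]
  | append_singleton ys y ih =>
      have hne : ys ++ [y] ≠ [] := by simp
      unfold contar_coincidencias
      simp only [hne, dite_false, List.getLast_concat, List.dropLast_concat]
      unfold contar_coincidencias_alt
      rw [List.reverse_append]
      simp only [List.reverse_singleton, List.singleton_append, pvAltLoop, List.length_reverse]
      split_ifs with h
      · rw [ih, contar_coincidencias_alt]; simpa using (pvAltLoop_add ys.reverse 0).symm
      · rw [ih, contar_coincidencias_alt]

-- ===== VERDICT (by name: the statement is the Claim_ definition above) =====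
theorem contar_coincidencias_spec : Claim_equal_contar_coincidencias := by
  intro xs _
  exact contar_eq_alt xs
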